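-- pv_equiv track=rewrite | github.com/Cheldra/rimworld_stuff | infobox_checker_core.py | cleanse_uninherited
-- ===== SOURCE A (Python) =====
-- def cleanse_uninherited(thing_dict):
--     removed_dict = thing_dict.copy()
--     for key in thing_dict.keys():
--         if '!' in key:
--             uninherit = key.split('!')[0]
--             for key2 in thing_dict.keys():
--                 if '!' not in key2 and key2 in removed_dict and key2[:len(uninherit)] == uninherit:
--                     del removed_dict[key2]
--     replaced_dict = {}
--     for key, val in removed_dict.items():
--         replaced_dict[key.replace('!', '')] = val
--     return replaced_dict
-- ===== SOURCE B (Python) =====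
-- def cleanse_uninherited(thing_dict):
--     prefixes = {k.split('!')[0] for k in thing_dict if '!' in k}
--     out = {}
--     for k, v in thing_dict.items():
--         if '!' in k or not any(k[:i] in prefixes for i in range(len(k) + 1)):
--             out[k.replace('!', '')] = v
--     return out
-- ===== Notes on version B (the rewrite author's own statement) =====
-- stated objective: alternative
-- what changed: A rescans the whole key list for every '!'-key (double loop with repeated deletions); B builds the set of uninherit prefixes once and keeps a key by testing that key's own prefixes against the set in a single pass.
import Mathlib
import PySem

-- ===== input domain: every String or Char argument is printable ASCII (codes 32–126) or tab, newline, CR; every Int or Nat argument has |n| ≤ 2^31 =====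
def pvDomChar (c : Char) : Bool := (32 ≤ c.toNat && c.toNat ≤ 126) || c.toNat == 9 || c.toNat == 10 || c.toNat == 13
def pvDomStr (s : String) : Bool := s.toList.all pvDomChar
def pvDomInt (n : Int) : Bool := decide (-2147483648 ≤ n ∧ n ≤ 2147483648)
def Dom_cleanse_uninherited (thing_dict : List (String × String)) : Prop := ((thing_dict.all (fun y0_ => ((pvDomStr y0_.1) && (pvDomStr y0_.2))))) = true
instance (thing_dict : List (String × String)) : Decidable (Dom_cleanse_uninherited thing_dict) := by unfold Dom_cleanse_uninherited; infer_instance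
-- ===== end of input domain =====

-- B replaces A's double loop (every '!'-key rescans every key, deleting matches) by one
-- prefix set built once plus a per-key prefix-membership test, in a single pass.

-- ===== PORT A =====
-- key.split('!')[0]  (used by both Pythons verbatim)
def pvBangPrefix (s : String) : String := ((PySem.Str.split? s "!").getD []).getD 0 ""

def cleanse_uninherited (thing_dict : List (String × String)) : List (String × String) :=
  let d := PySem.Dict.ofList thing_dict
  let removed := d.keys.foldl (fun rem key =>
    if PySem.Str.isIn "!" key then
      let uninherit := pvBangPrefix key
      d.keys.foldl (fun rem2 key2 =>
        if !PySem.Str.isIn "!" key2 && rem2.contains key2 &&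
            (PySem.Str.slice key2 none (some (PySem.Str.len uninherit)) == uninherit)
        then rem2.erase key2 else rem2) rem
    else rem) d
  let replaced := removed.items.foldl
    (fun r p => r.insert (PySem.Str.replace p.1 "!" "") p.2) PySem.Dict.empty
  replaced.items

-- ===== PORT B =====
def cleanse_uninherited_alt (thing_dict : List (String × String)) : List (String × String) :=
  let d := PySem.Dict.ofList thing_dict
  let prefixes : PySem.Set String :=
    PySem.Set.ofList ((d.keys.filter (fun k => PySem.Str.isIn "!" k)).map pvBangPrefix)
  let out := d.items.foldl (fun o p =>
    if PySem.Str.isIn "!" p.1 ||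
        !((PySem.List.pyRange 0 (PySem.Str.len p.1 + 1) 1).any
            (fun i => prefixes.contains (PySem.Str.slice p.1 none (some i))))
    then o.insert (PySem.Str.replace p.1 "!" "") p.2 else o) PySem.Dict.empty
  out.items

-- ===== PRECONDITION & SPEC =====
def Spec_cleanse_uninherited (thing_dict : List (String × String)) (out : List (String × String)) : Prop := out = cleanse_uninherited_alt thing_dict
instance (thing_dict : List (String × String)) (out : List (String × String)) : Decidable (Spec_cleanse_uninherited thing_dict out) := by unfold Spec_cleanse_uninherited; infer_instance

-- ===== CLAIM (what is proved, stated in full; the proofs are below) =====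
def Claim_equal_cleanse_uninherited : Prop := ∀ (thing_dict : List (String × String)), Dom_cleanse_uninherited thing_dict → Spec_cleanse_uninherited thing_dict (cleanse_uninherited thing_dict)

-- ===== LEMMAS AND PROOFS =====

lemma pv_fold_erase (c1 c2 : String → Bool) (ks : List String) (m : PySem.Dict String String) :
    (ks.foldl (fun m2 k2 => if c1 k2 && m2.contains k2 && c2 k2 then m2.erase k2 else m2) m).items
      = m.items.filter (fun p => !(c1 p.1 && c2 p.1 && ks.contains p.1)) := by
  induction ks generalizing m with
  | nil => simp
  | cons k ks ih =>
    rw [List.foldl_cons, ih]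
    by_cases hAB : (c1 k && c2 k) = true
    · have hA : c1 k = true := by simp_all
      have hB : c2 k = true := by simp_all
      by_cases hC : m.contains k = true
      · rw [if_pos (by rw [hA, hB, hC]; rfl)]
        have herase : (m.erase k).items = m.items.filter (fun p => !(p.1 == k)) := rfl
        rw [herase, List.filter_filter]
        apply List.filter_congr
        intro p _
        by_cases hp : p.1 = k
        · simp [hp, hA, hB]
        · simp [hp]
      · rw [if_neg (by simp [hC])]
        apply List.filter_congr
        intro p hp
        have hpk : ¬ p.1 = k := by
          intro he
          apply hC
          unfold PySem.Dict.contains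
          rw [List.any_eq_true]
          exact ⟨p, hp, by simp [he]⟩
        simp [hpk]
    · rw [if_neg (by intro hc; exact hAB (by cases h1 : c1 k <;> cases h2 : c2 k <;> simp_all))]
      apply List.filter_congr
      intro p _
      by_cases hp : p.1 = k
      · have : (c1 p.1 && c2 p.1) = false := by rw [hp]; simpa using hAB
        cases h1 : c1 p.1 <;> cases h2 : c2 p.1 <;> simp_all
      · simp [hp]

lemma pv_fold_outer (b c1 : String → Bool) (g : String → String → Bool)
    (dkeys ks : List String) (m : PySem.Dict String String)
    (h : ∀ p ∈ m.items, dkeys.contains p.1 = true) :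
    (ks.foldl (fun rem key =>
        if b key then
          dkeys.foldl (fun m2 k2 =>
            if c1 k2 && m2.contains k2 && g key k2 then m2.erase k2 else m2) rem
        else rem) m).items
      = m.items.filter (fun p => !(c1 p.1 && ks.any (fun k2 => b k2 && g k2 p.1))) := by
  induction ks generalizing m with
  | nil => simp
  | cons key ks ih =>
    rw [List.foldl_cons]
    cases hb : b key with
    | false =>
      rw [if_neg (by simp), ih m h]
      apply List.filter_congr
      intro p _
      simp [hb]
    | true =>
      rw [if_pos (by simp)]
      have hinner := pv_fold_erase c1 (g key) dkeys m
      have h' : ∀ p ∈ (dkeys.foldl (fun m2 k2 =>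
          if c1 k2 && m2.contains k2 && g key k2 then m2.erase k2 else m2) m).items,
          dkeys.contains p.1 = true := by
        intro p hp
        rw [hinner] at hp
        exact h p (List.mem_of_mem_filter hp)
      rw [ih _ h', hinner, List.filter_filter]
      apply List.filter_congr
      intro p hp
      have hd : p.1 ∈ dkeys := by simpa using h p hp
      cases hc1 : c1 p.1 <;> cases hg : g key p.1 <;>
        cases ha : ks.any (fun k2 => b k2 && g k2 p.1) <;> simp [hd, hb, hg, ha]

lemma pv_slice_eq_iff (u k : String) :
    ((PySem.Str.slice k none (some (PySem.Str.len u)) == u) = true)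
      ↔ k.toList.take u.toList.length = u.toList := by
  rw [beq_iff_eq, ← String.toList_inj]
  simp [pysem]

lemma pv_slice_toList (i : Int) (k : String) (h : 0 ≤ i) :
    (PySem.Str.slice k none (some i)).toList = k.toList.take i.toNat := by
  simp [pysem, PySem.List.slice_to, h]

lemma pv_keep_eq (dkeys : List String) (k : String) :
    (!(!PySem.Str.isIn "!" k &&
        dkeys.any (fun k2 => PySem.Str.isIn "!" k2 &&
          (PySem.Str.slice k none (some (PySem.Str.len (pvBangPrefix k2))) == pvBangPrefix k2))))
    = (PySem.Str.isIn "!" k ||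
        !((PySem.List.pyRange 0 (PySem.Str.len k + 1) 1).any
            (fun i => (PySem.Set.ofList ((dkeys.filter (fun k' => PySem.Str.isIn "!" k')).map pvBangPrefix)).contains
              (PySem.Str.slice k none (some i))))) := by
  cases hbang : PySem.Str.isIn "!" k with
  | true => simp only [Bool.not_true, Bool.false_and, Bool.not_false, Bool.true_or]
  | false =>
    simp only [Bool.not_false, Bool.true_and, Bool.false_or]
    congr 1
    rw [Bool.eq_iff_iff]
    simp only [List.any_eq_true]
    constructor
    · rintro ⟨k2, hk2mem, hk2⟩
      rw [Bool.and_eq_true] at hk2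
      obtain ⟨hb2, hpb⟩ := hk2
      set u := pvBangPrefix k2 with hu
      have htake : k.toList.take u.toList.length = u.toList := (pv_slice_eq_iff u k).mp hpb
      have hle : u.toList.length ≤ k.toList.length := by
        have h0 := congrArg List.length htake
        have h1 : u.toList.length = u.length := rfl
        have h2 : k.toList.length = k.length := rfl
        simp [List.length_take] at h0
        omega
      refine ⟨(u.toList.length : Int), ?_, ?_⟩
      · rw [PySem.List.mem_pyRange_one]
        constructor
        · positivity
        · have hlen : PySem.Str.len k = (k.length : Int) := by simp [pysem]
          have hk : k.toList.length = k.length := rfl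
          rw [hlen]
          omega
      · have hs : PySem.Str.slice k none (some (u.toList.length : Int)) = u := by
          rw [← String.toList_inj, pv_slice_toList _ _ (by positivity)]
          simpa using htake
        rw [hs]
        rw [PySem.Set.contains, List.contains_iff_mem, PySem.Set.mem_ofList]
        exact List.mem_map.mpr ⟨k2, List.mem_filter.mpr ⟨hk2mem, hb2⟩, rfl⟩
    · rintro ⟨i, hi, hc⟩
      rw [PySem.List.mem_pyRange_one] at hi
      rw [PySem.Set.contains, List.contains_iff_mem, PySem.Set.mem_ofList, List.mem_map] at hc
      obtain ⟨k2, hmf, hu⟩ := hc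
      rw [List.mem_filter] at hmf
      obtain ⟨hmem, hb2⟩ := hmf
      refine ⟨k2, hmem, ?_⟩
      rw [Bool.and_eq_true]
      refine ⟨hb2, ?_⟩
      rw [pv_slice_eq_iff]
      have hut : (pvBangPrefix k2).toList = k.toList.take i.toNat := by
        rw [hu, pv_slice_toList _ _ hi.1]
      rw [hut]
      simp [List.length_take]

-- ===== VERDICT (by name: the statement is the Claim_ definition above) =====
theorem cleanse_uninherited_spec : Claim_equal_cleanse_uninherited := by
  intro td _hdom
  unfold Spec_cleanse_uninherited
  simp only [cleanse_uninherited, cleanse_uninherited_alt]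
  have hkeys : ∀ p ∈ (PySem.Dict.ofList td).items,
      (PySem.Dict.ofList td).keys.contains p.1 = true := by
    intro p hp
    rw [List.contains_iff_mem]
    simp only [PySem.Dict.keys]
    exact List.mem_map.mpr ⟨p, hp, rfl⟩
  rw [pv_fold_outer (fun key => PySem.Str.isIn "!" key)
        (fun k2 => !PySem.Str.isIn "!" k2)
        (fun key k2 => (PySem.Str.slice k2 none (some (PySem.Str.len (pvBangPrefix key))) == pvBangPrefix key))
        (PySem.Dict.ofList td).keys (PySem.Dict.ofList td).keys _ hkeys,
      ← List.foldl_filter]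
  rw [List.filter_congr (fun p _ => pv_keep_eq (PySem.Dict.ofList td).keys p.1)]
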